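-- pv_equiv track=rewrite | github.com/sarvex/python-leetcode | 3333.Find the Original Typed String II.py | countOriginalStrings
-- ===== SOURCE A (Python) =====
-- def countOriginalStrings(word: str, k: int) -> int:
--     MOD: int = 10**9 + 7
--     n: int = len(word)
--
--     # Step 1: Group consecutive identical characters
--     groups: list[int] = []
--     current_count: int = 1
--
--     for i in range(1, n):
--         if word[i] == word[i-1]:
--             current_count += 1
--         else:
--             groups.append(current_count)
--             current_count = 1
--     groups.append(current_count)  # Add the last group
--
--     # Calculate total possible combinations (product of all group frequencies)
--     total_combinations: int = 1
--     for count in groups: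
--         total_combinations = (total_combinations * count) % MOD
--
--     # Step 2: Early return if we have enough groups
--     if len(groups) >= k:
--         return total_combinations
--
--     # Step 3: Use DP with inclusion-exclusion principle
--     # exact[j] = number of ways to form strings with exactly j groups
--     # at_most[j] = number of ways to form strings with at most j groups
--     exact = [1] + [0] * (k - 1)  # exact[0] = 1 (empty string has 0 groups)
--     at_most = [1] * k  # at_most[j] = sum of exact[0...j]
--
--     # Process each group frequency
--     for freq in groups:
--         # Calculate new exact values
--         new_exact = [0] * k
--
--         for j in range(1, k):
--             # Add a new group
--             new_exact[j] = at_most[j - 1]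
--
--             # Apply inclusion-exclusion principle
--             if j > freq:
--                 new_exact[j] = (new_exact[j] - at_most[j - freq - 1]) % MOD
--
--         # Calculate new at_most values (prefix sums)
--         new_at_most = [new_exact[0]] + [0] * (k - 1)
--         for j in range(1, k):
--             new_at_most[j] = (new_at_most[j - 1] + new_exact[j]) % MOD
--
--         # Update for next iteration
--         at_most = new_at_most
--
--     # Step 4: Return total combinations minus invalid combinations
--     return (total_combinations - at_most[k - 1]) % MOD
-- ===== SOURCE B (Python) =====
-- def countOriginalStrings(word: str, k: int) -> int:
--     MOD = 10**9 + 7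
--
--     # Run-length encode with a two-pointer scan.
--     groups = []
--     i, n = 0, len(word)
--     while i < n:
--         j = i
--         while j < n and word[j] == word[i]:
--             j += 1
--         groups.append(j - i)
--         i = j
--
--     total = 1
--     for g in groups:
--         total = total * g % MOD
--
--     if len(groups) >= k:
--         return total
--
--     # exact[j] = number of ways to use exactly j groups so far (mod MOD).
--     exact = [1] + [0] * (k - 1)
--     for freq in groups:
--         new_exact = [0] * k
--         for j in range(1, k):
--             s = 0
--             for i in range(max(0, j - freq), j):
--                 s += exact[i]
--             new_exact[j] = s % MOD
--         exact = new_exact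
--
--     return (total - sum(exact)) % MOD
-- ===== Notes on version B (the rewrite author's own statement) =====
-- stated objective: simpler
-- what changed: B run-length encodes with a two-pointer scan instead of A's adjacent-pair index loop, and replaces A's two-array inclusion-exclusion DP (exact + at_most prefix-sum table, answer via at_most[k-1]) by a single exact[] array whose entries are recomputed each round as a direct window sum, subtracting sum(exact) at the end.
-- intended difference: On the empty word with k = 1, A's unconditional final groups.append invents a phantom group and returns 1, while B returns 0, the intended count since the empty original string has 0 groups, fewer than k = 1. — e.g. on countOriginalStrings("", 1): A returns 1, B returns 0
import Mathlib
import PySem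

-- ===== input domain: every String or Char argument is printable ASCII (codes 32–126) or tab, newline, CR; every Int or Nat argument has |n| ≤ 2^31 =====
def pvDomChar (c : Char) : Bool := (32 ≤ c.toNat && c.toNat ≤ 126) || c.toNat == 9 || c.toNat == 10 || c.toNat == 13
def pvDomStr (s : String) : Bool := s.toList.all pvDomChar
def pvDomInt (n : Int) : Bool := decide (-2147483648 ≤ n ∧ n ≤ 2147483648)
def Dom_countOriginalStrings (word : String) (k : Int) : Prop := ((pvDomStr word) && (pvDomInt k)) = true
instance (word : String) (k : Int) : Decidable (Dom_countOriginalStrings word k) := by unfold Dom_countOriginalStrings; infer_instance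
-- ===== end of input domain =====

-- B replaces A's prefix-sum (`at_most`) DP by a single `exact` array whose entries are
-- recomputed with a direct window sum, and run-length encodes with a two-pointer scan;
-- objective: simpler (one DP array, no inclusion–exclusion subtraction), not faster.

-- ===== PORT A =====
def countOriginalStrings (word : String) (k : Int) : Int :=
  let MOD : Int := 1000000007
  let cs := word.toList
  let n : Int := PySem.Str.len word
  -- for i in range(1, n): compare word[i] with word[i-1], building (groups, current_count)
  let gc : List Int × Int :=
    (PySem.List.pyRange 1 n 1).foldl (fun (st : List Int × Int) i =>
      if PySem.List.pyGetD cs i ' ' = PySem.List.pyGetD cs (i-1) ' ' then (st.1, st.2 + 1)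
      else (st.1 ++ [st.2], 1)) ([], 1)
  let groups : List Int := gc.1 ++ [gc.2]
  let total : Int := groups.foldl (fun t c => PySem.Int.mod (t * c) MOD) 1
  if (groups.length : Int) ≥ k then total
  else
    let atMost0 : List Int := List.replicate k.toNat 1
    let atMost := groups.foldl (fun am freq =>
      -- new_exact[0] = 0; new_exact[j] = at_most[j-1] (− at_most[j-freq-1] if j > freq), j = 1..k-1
      let newExact : List Int :=
        0 :: (PySem.List.pyRange 1 k 1).map (fun j =>
          if j > freq then
            PySem.Int.mod (PySem.List.pyGetD am (j-1) 0 - PySem.List.pyGetD am (j - freq - 1) 0) MOD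
          else PySem.List.pyGetD am (j-1) 0)
      -- new_at_most: running prefix sums of new_exact, mod MOD
      (PySem.List.pyRange 1 k 1).foldl (fun acc j =>
          acc ++ [PySem.Int.mod (PySem.List.pyGetD acc (j-1) 0 + PySem.List.pyGetD newExact j 0) MOD])
        [PySem.List.pyGetD newExact 0 0]) atMost0
    PySem.Int.mod (total - PySem.List.pyGetD atMost (k-1) 0) MOD

-- ===== PORT B =====
-- two-pointer run-length scan: state (c, cnt) is (word[i], j - i); the inner
-- `while word[j] == word[i]` is the `x == c` branch, `i = j` is the restart with (x, 1)
def pvRunsGo : List Char → Char → Int → List Int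
  | [], _, cnt => [cnt]
  | x :: rest, c, cnt => if x == c then pvRunsGo rest c (cnt + 1) else cnt :: pvRunsGo rest x 1

def pvRuns : List Char → List Int
  | [] => []
  | c :: rest => pvRunsGo rest c 1

def countOriginalStrings_alt (word : String) (k : Int) : Int :=
  let MOD : Int := 1000000007
  let groups := pvRuns word.toList
  let total : Int := groups.foldl (fun t g => PySem.Int.mod (t * g) MOD) 1
  if (groups.length : Int) ≥ k then total
  else
    let exact0 : List Int := 1 :: List.replicate (k - 1).toNat 0
    let exact := groups.foldl (fun ex freq =>
      -- new_exact[j] = (sum of exact[i] for i in range(max(0, j-freq), j)) % MOD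
      0 :: (PySem.List.pyRange 1 k 1).map (fun j =>
        PySem.Int.mod ((PySem.List.pyRange (max 0 (j - freq)) j 1).foldl
          (fun s i => s + PySem.List.pyGetD ex i 0) 0) MOD)) exact0
    PySem.Int.mod (total - exact.foldl (· + ·) 0) MOD

-- ===== PRECONDITION & SPEC =====
-- On the empty word with k = 1, A's unconditional final `groups.append(current_count)` invents a
-- phantom group of size 1 and returns 1, while B returns 0 — the intended count, since the empty
-- original string has 0 groups, fewer than k = 1.
def D_countOriginalStrings (word : String) (k : Int) : Prop := word = "" ∧ k = 1
instance (word : String) (k : Int) : Decidable (D_countOriginalStrings word k) := by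
  unfold D_countOriginalStrings; infer_instance

def Spec_countOriginalStrings (word : String) (k : Int) (out : Int) : Prop :=
  ¬ D_countOriginalStrings word k → out = countOriginalStrings_alt word k
instance (word : String) (k : Int) (out : Int) : Decidable (Spec_countOriginalStrings word k out) := by
  unfold Spec_countOriginalStrings; infer_instance

def pvDiffWitness_countOriginalStrings : String × Int := ("", 1)
def pvDiffWitnessOut_countOriginalStrings : Int × Int := (1, 0)

-- ===== CLAIM (what is proved, stated in full; the proofs are below) =====
def Claim_unchanged_countOriginalStrings : Prop := ∀ (word : String) (k : Int), Dom_countOriginalStrings word k → Spec_countOriginalStrings word k (countOriginalStrings word k)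
def Claim_changed_countOriginalStrings : Prop := Dom_countOriginalStrings (pvDiffWitness_countOriginalStrings.1) (pvDiffWitness_countOriginalStrings.2) ∧ D_countOriginalStrings (pvDiffWitness_countOriginalStrings.1) (pvDiffWitness_countOriginalStrings.2) ∧ countOriginalStrings (pvDiffWitness_countOriginalStrings.1) (pvDiffWitness_countOriginalStrings.2) = pvDiffWitnessOut_countOriginalStrings.1 ∧ countOriginalStrings_alt (pvDiffWitness_countOriginalStrings.1) (pvDiffWitness_countOriginalStrings.2) = pvDiffWitnessOut_countOriginalStrings.2 ∧ pvDiffWitnessOut_countOriginalStrings.1 ≠ pvDiffWitnessOut_countOriginalStrings.2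
def Claim_exact_countOriginalStrings : Prop := ∀ (word : String) (k : Int), Dom_countOriginalStrings word k → D_countOriginalStrings word k → countOriginalStrings word k ≠ countOriginalStrings_alt word k

-- ===== LEMMAS AND PROOFS =====

-- abbreviations mirroring the two ports' loop bodies (definitional)
def pvM : Int := 1000000007

def pvS (ex : List Int) (a b : Int) : Int :=
  (PySem.List.pyRange a b 1).foldl (fun s i => s + PySem.List.pyGetD ex i 0) 0

def pvBstep (k : Int) (ex : List Int) (freq : Int) : List Int :=
  0 :: (PySem.List.pyRange 1 k 1).map (fun j =>
    PySem.Int.mod (pvS ex (max 0 (j - freq)) j) pvM)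

def pvAstepE (k : Int) (am : List Int) (freq : Int) : List Int :=
  0 :: (PySem.List.pyRange 1 k 1).map (fun j =>
    if j > freq then
      PySem.Int.mod (PySem.List.pyGetD am (j-1) 0 - PySem.List.pyGetD am (j - freq - 1) 0) pvM
    else PySem.List.pyGetD am (j-1) 0)

def pvPF (k : Int) (ne : List Int) : List Int :=
  (PySem.List.pyRange 1 k 1).foldl (fun acc j =>
      acc ++ [PySem.Int.mod (PySem.List.pyGetD acc (j-1) 0 + PySem.List.pyGetD ne j 0) pvM])
    [PySem.List.pyGetD ne 0 0]

def pvAstep (k : Int) (am : List Int) (freq : Int) : List Int := pvPF k (pvAstepE k am freq)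

def pvBodyG (st : List Int × Int) (p : Char × Char) : List Int × Int :=
  if p.2 = p.1 then (st.1, st.2 + 1) else (st.1 ++ [st.2], 1)

def pvInv (k : Int) (am ex : List Int) : Prop :=
  am.length = k.toNat ∧ ex.length = k.toNat ∧
  ∀ j : Int, 0 ≤ j → j < k → PySem.List.pyGetD am j 0 = PySem.Int.mod (pvS ex 0 (j+1)) pvM

theorem pvmod_def (a : Int) : PySem.Int.mod a pvM = a % pvM := by
  exact PySem.Int.mod_eq_emod_of_pos (by norm_num [pvM])

-- indexing helpers
theorem pvGetD_append_left (xs ys : List Int) (j : Int) (h0 : 0 ≤ j) (h1 : j < xs.length) :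
    PySem.List.pyGetD (xs ++ ys) j 0 = PySem.List.pyGetD xs j 0 := by
  rw [PySem.List.pyGetD_eq_getElem (xs ++ ys) 0 h0 (by simp; omega),
      PySem.List.pyGetD_eq_getElem xs 0 h0 h1]
  exact List.getElem_append_left (by omega)

theorem pvGetD_append_last (xs : List Int) (x : Int) :
    PySem.List.pyGetD (xs ++ [x]) (xs.length : Int) 0 = x := by
  rw [PySem.List.pyGetD_natCast]
  simp [List.getD]

theorem pvGetD_cons_pos (a : Int) (l : List Int) (j : Int) (h : 1 ≤ j) :
    PySem.List.pyGetD (a :: l) j 0 = PySem.List.pyGetD l (j - 1) 0 := by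
  obtain ⟨n, rfl⟩ : ∃ n : Nat, j = ((n : Int) + 1) := ⟨(j - 1).toNat, by omega⟩
  have h1 : (n : Int) + 1 = (((n + 1 : Nat)) : Int) := by push_cast; ring
  have h2 : (n : Int) + 1 - 1 = ((n : Nat) : Int) := by ring
  rw [h2, h1, PySem.List.pyGetD_natCast, PySem.List.pyGetD_natCast]
  simp

theorem pvGetD_step (f : Int → Int) (k j : Int) (h1 : 1 ≤ j) (h2 : j < k) :
    PySem.List.pyGetD (0 :: (PySem.List.pyRange 1 k 1).map f) j 0 = f j := by
  rw [pvGetD_cons_pos _ _ _ h1]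
  have h3 : j - 1 = (((j - 1).toNat : Nat) : Int) := by omega
  rw [h3, PySem.List.pyGetD_map_pyRange_one f 1 k _ 0 (by omega)]
  congr 1
  omega

-- sum helpers
theorem pvS_empty (ex : List Int) (a : Int) : pvS ex a a = 0 := by
  unfold pvS
  rw [PySem.List.pyRange_one_eq_nil le_rfl]
  rfl

theorem pvS_succ (ex : List Int) (a b : Int) (h : a ≤ b) :
    pvS ex a (b + 1) = pvS ex a b + PySem.List.pyGetD ex b 0 := by
  unfold pvS
  rw [PySem.List.pyRange_one_succ_right h, List.foldl_append]
  rfl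

theorem pvS_split (ex : List Int) (a m b : Int) (h1 : a ≤ m) (h2 : m ≤ b) :
    pvS ex a b = pvS ex a m + pvS ex m b := by
  unfold pvS
  rw [PySem.List.pyRange_one_append a m b h1 h2, List.foldl_append,
      PySem.List.foldl_add, PySem.List.foldl_add, PySem.List.foldl_add]
  ring

theorem pvS_zero (ex : List Int) (a b : Int)
    (h : ∀ j : Int, a ≤ j → j < b → PySem.List.pyGetD ex j 0 = 0) :
    pvS ex a b = 0 := by
  suffices H : ∀ (d : Nat) (b : Int), (b - a).toNat ≤ d →
      (∀ j : Int, a ≤ j → j < b → PySem.List.pyGetD ex j 0 = 0) → pvS ex a b = 0 by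
    exact H (b - a).toNat b le_rfl h
  intro d
  induction d with
  | zero =>
      intro b hb _
      unfold pvS
      rw [PySem.List.pyRange_one_eq_nil (by omega)]
      rfl
  | succ d ih =>
      intro b hb hz
      by_cases hab : b ≤ a
      · unfold pvS
        rw [PySem.List.pyRange_one_eq_nil hab]
        rfl
      · have hb1 : b = (b - 1) + 1 := by omega
        rw [hb1, pvS_succ ex a (b - 1) (by omega),
            ih (b - 1) (by omega) (fun j hj1 hj2 => hz j hj1 (by omega)),
            hz (b - 1) (by omega) (by omega)]
        ring

theorem pvS_indicator (ex : List Int) (a b t v : Int) (h1 : a ≤ t) (h2 : t < b)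
    (h : ∀ j : Int, a ≤ j → j < b → PySem.List.pyGetD ex j 0 = if j = t then v else 0) :
    pvS ex a b = v := by
  rw [pvS_split ex a t b h1 (by omega), pvS_split ex t (t + 1) b (by omega) (by omega),
      pvS_succ ex t t le_rfl, pvS_empty,
      pvS_zero ex a t (fun j hj1 hj2 => by rw [h j hj1 (by omega)]; simp; omega),
      pvS_zero ex (t + 1) b (fun j hj1 hj2 => by rw [h j (by omega) hj2]; simp; omega)]
  rw [h t h1 h2]
  simp

theorem pvGetD_replicate_zero (m : Nat) (t : Int) :
    PySem.List.pyGetD (List.replicate m (0 : Int)) t 0 = 0 := by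
  simp only [PySem.List.pyGetD, PySem.List.pyIdx?, PySem.List.pyGet?,
    List.length_replicate, List.getElem?_replicate]
  split_ifs <;> simp
  all_goals split_ifs <;> simp

theorem pvGetD_ex0 (k i : Int) (h0 : 0 ≤ i) (_h1 : i < k) :
    PySem.List.pyGetD (1 :: List.replicate (k - 1).toNat (0 : Int)) i 0
      = if i = 0 then 1 else 0 := by
  by_cases hi : i = 0
  · simp [hi, PySem.List.pyGetD_zero_cons]
  · rw [if_neg hi, pvGetD_cons_pos _ _ _ (by omega), pvGetD_replicate_zero]

-- invariant lemmas
theorem pvInv_init (k : Int) (hk : 1 ≤ k) :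
    pvInv k (List.replicate k.toNat 1) (1 :: List.replicate (k - 1).toNat 0) := by
  refine ⟨by simp, by simp; omega, ?_⟩
  intro j h0 hjk
  rw [PySem.List.pyGetD_eq_getElem _ 0 h0 (by simp; omega)]
  rw [pvS_indicator _ 0 (j + 1) 0 1 le_rfl (by omega)
        (fun i hi1 hi2 => pvGetD_ex0 k i hi1 (by omega))]
  simp [pvM]

theorem pvAstepE_eq_pvBstep (k freq : Int) (am ex : List Int) (hInv : pvInv k am ex)
    (hf : 1 ≤ freq) : pvAstepE k am freq = pvBstep k ex freq := by
  obtain ⟨hla, hle, hI⟩ := hInv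
  unfold pvAstepE pvBstep
  congr 1
  apply List.map_congr_left
  intro j hj
  rw [PySem.List.mem_pyRange_one] at hj
  have hgj : PySem.List.pyGetD am (j - 1) 0 = PySem.Int.mod (pvS ex 0 j) pvM := by
    have := hI (j - 1) (by omega) (by omega)
    rwa [show j - 1 + 1 = j by ring] at this
  by_cases hcase : j > freq
  · rw [if_pos hcase, hgj]
    have hgf : PySem.List.pyGetD am (j - freq - 1) 0
        = PySem.Int.mod (pvS ex 0 (j - freq)) pvM := by
      have := hI (j - freq - 1) (by omega) (by omega)
      rwa [show j - freq - 1 + 1 = j - freq by ring] at this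
    rw [hgf, show max 0 (j - freq) = j - freq by omega,
        pvS_split ex 0 (j - freq) j (by omega) (by omega)]
    simp only [pvmod_def]
    simp only [pvM]
    omega
  · rw [if_neg hcase, hgj, show max 0 (j - freq) = 0 by omega]

theorem pvPF_spec (k : Int) (ne : List Int) (hk : 1 ≤ k) (h0 : PySem.List.pyGetD ne 0 0 = 0) :
    (pvPF k ne).length = k.toNat ∧
    ∀ j : Int, 0 ≤ j → j < k →
      PySem.List.pyGetD (pvPF k ne) j 0 = PySem.Int.mod (pvS ne 0 (j+1)) pvM := by
  have key : ∀ mN : Nat, ((mN : Int) + 1 ≤ k) →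
      (((PySem.List.pyRange 1 ((mN : Int) + 1) 1).foldl (fun acc j =>
          acc ++ [PySem.Int.mod (PySem.List.pyGetD acc (j-1) 0 + PySem.List.pyGetD ne j 0) pvM])
        [PySem.List.pyGetD ne 0 0]).length = mN + 1) ∧
      ∀ j : Int, 0 ≤ j → j ≤ (mN : Int) →
        PySem.List.pyGetD ((PySem.List.pyRange 1 ((mN : Int) + 1) 1).foldl (fun acc j =>
            acc ++ [PySem.Int.mod (PySem.List.pyGetD acc (j-1) 0 + PySem.List.pyGetD ne j 0) pvM])
          [PySem.List.pyGetD ne 0 0]) j 0 = PySem.Int.mod (pvS ne 0 (j+1)) pvM := by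
    intro mN
    induction mN with
    | zero =>
        intro _
        rw [show ((0 : Nat) : Int) + 1 = 1 by norm_num, PySem.List.pyRange_one_eq_nil le_rfl]
        simp only [List.foldl_nil]
        constructor
        · simp
        · intro j hj0 hj1
          have hj : j = 0 := by omega
          subst hj
          rw [PySem.List.pyGetD_zero_cons, h0,
              show (0 : Int) + 1 = 0 + 1 by ring, pvS_succ ne 0 0 le_rfl, pvS_empty, h0]
          simp [pvmod_def]
    | succ mD ih =>
        intro hm
        obtain ⟨ihlen, ihget⟩ := ih (by omega)
        rw [show ((mD + 1 : Nat) : Int) + 1 = ((mD : Int) + 1) + 1 by push_cast; ring,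
            PySem.List.pyRange_one_succ_right (by omega), List.foldl_append]
        simp only [List.foldl_cons, List.foldl_nil]
        constructor
        · simp [ihlen]
        · intro j hj0 hj1
          set L := (PySem.List.pyRange 1 ((mD : Int) + 1) 1).foldl (fun acc j =>
              acc ++ [PySem.Int.mod (PySem.List.pyGetD acc (j-1) 0
                + PySem.List.pyGetD ne j 0) pvM]) [PySem.List.pyGetD ne 0 0] with hL
          by_cases hj : j ≤ (mD : Int)
          · rw [pvGetD_append_left _ _ _ hj0 (by rw [ihlen]; push_cast; omega)]
            exact ihget j hj0 hj
          · have hj' : j = (mD : Int) + 1 := by omega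
            subst hj'
            rw [show (mD : Int) + 1 - 1 = (mD : Int) by ring]
            have hcast : ((mD : Int) + 1) = ((L.length : Nat) : Int) := by
              rw [ihlen]; push_cast; ring
            rw [hcast, pvGetD_append_last, ihget (mD : Int) (by omega) le_rfl, ← hcast]
            rw [pvS_succ ne 0 ((mD : Int) + 1) (by omega)]
            simp only [pvmod_def]
            simp only [pvM]
            omega
  have hk1 : k = (((k - 1).toNat : Int)) + 1 := by omega
  obtain ⟨hlen, hget⟩ := key (k - 1).toNat (by omega)
  constructor
  · unfold pvPF
    rw [hk1]
    rw [hlen]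
    omega
  · intro j hj0 hjk
    unfold pvPF
    rw [hk1]
    exact hget j hj0 (by omega)

theorem pvInv_step (k freq : Int) (am ex : List Int) (hInv : pvInv k am ex)
    (hf : 1 ≤ freq) (hk : 1 ≤ k) : pvInv k (pvAstep k am freq) (pvBstep k ex freq) := by
  unfold pvAstep
  rw [pvAstepE_eq_pvBstep k freq am ex hInv hf]
  have h0 : PySem.List.pyGetD (pvBstep k ex freq) 0 0 = 0 := by
    unfold pvBstep
    rw [PySem.List.pyGetD_zero_cons]
  obtain ⟨hlen, hget⟩ := pvPF_spec k (pvBstep k ex freq) hk h0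
  refine ⟨hlen, ?_, hget⟩
  unfold pvBstep
  simp [PySem.List.length_pyRange_one]
  omega

theorem pvInv_fold (k : Int) (gs : List Int) (hk : 1 ≤ k) :
    ∀ (am ex : List Int), (∀ g ∈ gs, 1 ≤ g) → pvInv k am ex →
    pvInv k (gs.foldl (pvAstep k) am) (gs.foldl (pvBstep k) ex) := by
  induction gs with
  | nil => intro am ex _ hInv; simpa using hInv
  | cons g gs ih =>
      intro am ex hpos hInv
      simp only [List.foldl_cons]
      exact ih _ _ (fun x hx => hpos x (by simp [hx]))
        (pvInv_step k g am ex hInv (hpos g (by simp)) hk)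

theorem pvFoldl_sum_eq_pvS (ex : List Int) :
    ex.foldl (· + ·) 0 = pvS ex 0 (ex.length : Int) := by
  unfold pvS
  rw [← PySem.List.foldl_pyRange_zero_pyGetD' ex 0 (· + ·) 0]

theorem pvFinal (k t : Int) (am ex : List Int) (hInv : pvInv k am ex) (hk : 1 ≤ k) :
    PySem.Int.mod (t - PySem.List.pyGetD am (k-1) 0) pvM
      = PySem.Int.mod (t - ex.foldl (· + ·) 0) pvM := by
  obtain ⟨hla, hle, hI⟩ := hInv
  have h1 := hI (k - 1) (by omega) (by omega)
  rw [show k - 1 + 1 = k by ring] at h1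
  rw [h1, pvFoldl_sum_eq_pvS ex, hle, show ((k.toNat : Nat) : Int) = k by omega]
  simp only [pvmod_def]
  simp only [pvM]
  omega

-- grouping lemmas
theorem pvRunsGo_pos : ∀ (rest : List Char) (c : Char) (cnt : Int), 1 ≤ cnt →
    ∀ g ∈ pvRunsGo rest c cnt, 1 ≤ g := by
  intro rest
  induction rest with
  | nil => intro c cnt h g hg; simp [pvRunsGo] at hg; omega
  | cons x rest ih =>
      intro c cnt h g hg
      simp only [pvRunsGo] at hg
      by_cases hx : x == c
      · rw [if_pos hx] at hg
        exact ih c (cnt + 1) (by omega) g hg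
      · rw [if_neg hx] at hg
        rcases List.mem_cons.mp hg with h1 | h2
        · omega
        · exact ih x 1 le_rfl g h2

theorem pvRuns_pos (cs : List Char) : ∀ g ∈ pvRuns cs, 1 ≤ g := by
  cases cs with
  | nil => simp [pvRuns]
  | cons c rest => exact pvRunsGo_pos rest c 1 le_rfl

theorem pvPairsFold_runs : ∀ (rest : List Char) (c : Char) (gs : List Int) (cur : Int),
    (((c :: rest).zip rest).foldl pvBodyG (gs, cur)).1
      ++ [(((c :: rest).zip rest).foldl pvBodyG (gs, cur)).2]
    = gs ++ pvRunsGo rest c cur := by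
  intro rest
  induction rest with
  | nil => intro c gs cur; simp [pvRunsGo]
  | cons x rest ih =>
      intro c gs cur
      rw [List.zip_cons_cons, List.foldl_cons]
      by_cases hx : x = c
      · have hb : pvBodyG (gs, cur) (c, x) = (gs, cur + 1) := by
          simp [pvBodyG, hx]
        rw [hb, show pvRunsGo (x :: rest) c cur = pvRunsGo rest c (cur + 1) by
              simp [pvRunsGo, hx]]
        subst hx
        exact ih x gs (cur + 1)
      · have hb : pvBodyG (gs, cur) (c, x) = (gs ++ [cur], 1) := by
          simp [pvBodyG, hx]
        rw [hb, show pvRunsGo (x :: rest) c cur = cur :: pvRunsGo rest x 1 by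
              simp [pvRunsGo, hx]]
        rw [ih x (gs ++ [cur]) 1]
        simp

theorem pvIndexFold_pairs (cs : List Char) (init : List Int × Int) :
    (PySem.List.pyRange 1 (cs.length : Int) 1).foldl (fun (st : List Int × Int) i =>
      if PySem.List.pyGetD cs i ' ' = PySem.List.pyGetD cs (i-1) ' ' then (st.1, st.2 + 1)
      else (st.1 ++ [st.2], 1)) init
    = (cs.zip cs.tail).foldl pvBodyG init := by
  cases cs with
  | nil => rw [PySem.List.pyRange_one_eq_nil (by simp)]; simp
  | cons c rest =>
      have key : ∀ m : Nat, m + 1 ≤ (c :: rest).length →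
          (PySem.List.pyRange 1 ((m : Int) + 1) 1).foldl (fun (st : List Int × Int) i =>
            if PySem.List.pyGetD (c :: rest) i ' ' = PySem.List.pyGetD (c :: rest) (i-1) ' '
            then (st.1, st.2 + 1) else (st.1 ++ [st.2], 1)) init
          = (((c :: rest).zip rest).take m).foldl pvBodyG init := by
        intro m
        induction m with
        | zero =>
            intro _
            rw [show ((0 : Nat) : Int) + 1 = 1 by norm_num,
                PySem.List.pyRange_one_eq_nil le_rfl]
            simp
        | succ m ih =>
            intro hm
            rw [show (((m + 1 : Nat)) : Int) + 1 = ((m : Int) + 1) + 1 by push_cast; ring,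
                PySem.List.pyRange_one_succ_right (by omega), List.foldl_append]
            simp only [List.foldl_cons, List.foldl_nil]
            rw [ih (by simp at hm ⊢; omega)]
            have hmlt : m + 1 < (c :: rest).length := by simpa using hm
            have hzlen : m < ((c :: rest).zip rest).length := by
              simp [List.length_zip] at *; omega
            rw [List.take_add_one, List.getElem?_eq_getElem hzlen, List.foldl_append]
            simp only [Option.toList_some, List.foldl_cons, List.foldl_nil]
            rw [PySem.List.pyGetD_eq_getElem _ ' ' (by omega) (by push_cast; omega),
                show (m : Int) + 1 - 1 = ((m : Nat) : Int) by ring,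
                PySem.List.pyGetD_eq_getElem _ ' ' (by omega) (by push_cast; omega)]
            rw [List.getElem_zip]
            simp only [pvBodyG, show ((m : Int) + 1).toNat = m + 1 from by omega,
                show ((m : Nat) : Int).toNat = m from by omega, List.getElem_cons_succ]
      have hfin := key rest.length (by simp)
      rw [show ((rest.length : Nat) : Int) + 1 = ((c :: rest).length : Int) by simp] at hfin
      rw [hfin, List.tail_cons, List.take_of_length_le (by simp [List.length_zip])]

theorem pvGroupsA_eq (c : Char) (rest : List Char) :
    (let gc := (PySem.List.pyRange 1 ((c :: rest).length : Int) 1).foldl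
        (fun (st : List Int × Int) i =>
          if PySem.List.pyGetD (c :: rest) i ' ' = PySem.List.pyGetD (c :: rest) (i-1) ' '
          then (st.1, st.2 + 1) else (st.1 ++ [st.2], 1)) ([], 1)
     gc.1 ++ [gc.2]) = pvRuns (c :: rest) := by
  show ((PySem.List.pyRange 1 ((c :: rest).length : Int) 1).foldl
        (fun (st : List Int × Int) i =>
          if PySem.List.pyGetD (c :: rest) i ' ' = PySem.List.pyGetD (c :: rest) (i-1) ' '
          then (st.1, st.2 + 1) else (st.1 ++ [st.2], 1)) ([], 1)).1
      ++ [((PySem.List.pyRange 1 ((c :: rest).length : Int) 1).foldl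
        (fun (st : List Int × Int) i =>
          if PySem.List.pyGetD (c :: rest) i ' ' = PySem.List.pyGetD (c :: rest) (i-1) ' '
          then (st.1, st.2 + 1) else (st.1 ++ [st.2], 1)) ([], 1)).2] = pvRuns (c :: rest)
  rw [pvIndexFold_pairs (c :: rest) ([], 1), List.tail_cons]
  have := pvPairsFold_runs rest c [] 1
  simpa [pvRuns] using this

-- final assembly
def pvGA (word : String) : List Int :=
  (let gc := (PySem.List.pyRange 1 (PySem.Str.len word) 1).foldl (fun (st : List Int × Int) i =>
      if PySem.List.pyGetD word.toList i ' ' = PySem.List.pyGetD word.toList (i-1) ' '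
      then (st.1, st.2 + 1) else (st.1 ++ [st.2], 1)) ([], 1)
   gc.1 ++ [gc.2])

def pvTot (groups : List Int) : Int :=
  groups.foldl (fun t c => PySem.Int.mod (t * c) pvM) 1

theorem pvA_eq (word : String) (k : Int) :
    countOriginalStrings word k =
      (if ((pvGA word).length : Int) ≥ k then pvTot (pvGA word)
       else PySem.Int.mod (pvTot (pvGA word) - PySem.List.pyGetD
         ((pvGA word).foldl (pvAstep k) (List.replicate k.toNat 1)) (k-1) 0) pvM) := rfl

theorem pvB_eq (word : String) (k : Int) :
    countOriginalStrings_alt word k =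
      (if ((pvRuns word.toList).length : Int) ≥ k then pvTot (pvRuns word.toList)
       else PySem.Int.mod (pvTot (pvRuns word.toList) -
         ((pvRuns word.toList).foldl (pvBstep k)
           (1 :: List.replicate (k-1).toNat 0)).foldl (· + ·) 0) pvM) := rfl

theorem pvGA_nil (word : String) (hcs : word.toList = []) : pvGA word = [1] := by
  unfold pvGA
  rw [PySem.Str.len_eq, hcs]
  simp [PySem.List.pyRange_one_eq_nil]

theorem pvGA_cons (word : String) (c : Char) (rest : List Char)
    (hcs : word.toList = c :: rest) : pvGA word = pvRuns word.toList := by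
  unfold pvGA
  rw [PySem.Str.len_eq, hcs]
  exact pvGroupsA_eq c rest

theorem pvRunsGo_ne_nil (rest : List Char) : ∀ (c : Char) (cnt : Int), pvRunsGo rest c cnt ≠ [] := by
  induction rest with
  | nil => intro c cnt; simp [pvRunsGo]
  | cons x rest ih =>
      intro c cnt
      simp only [pvRunsGo]
      by_cases hx : x == c
      · rw [if_pos hx]; exact ih c (cnt + 1)
      · rw [if_neg hx]; simp

theorem pvDP_eq (k total : Int) (groups : List Int) (hpos : ∀ g ∈ groups, 1 ≤ g) (hk : 1 ≤ k) :
    PySem.Int.mod (total - PySem.List.pyGetD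
        (groups.foldl (pvAstep k) (List.replicate k.toNat 1)) (k-1) 0) pvM
      = PySem.Int.mod (total - ((groups.foldl (pvBstep k)
          (1 :: List.replicate (k-1).toNat 0)).foldl (· + ·) 0)) pvM :=
  pvFinal k total _ _ (pvInv_fold k groups hk _ _ hpos (pvInv_init k hk)) hk

theorem pvSum_ex0 (k : Int) (hk : 1 ≤ k) :
    pvS (1 :: List.replicate (k-1).toNat 0) 0 k = 1 :=
  pvS_indicator _ 0 k 0 1 le_rfl (by omega) (fun i h1 h2 => pvGetD_ex0 k i h1 h2)

theorem pvSum_ex1 (k : Int) (hk : 2 ≤ k) :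
    pvS (pvBstep k (1 :: List.replicate (k-1).toNat 0) 1) 0 k = 1 := by
  apply pvS_indicator _ 0 k 1 1 (by omega) (by omega)
  intro j h1 h2
  by_cases hj : j = 0
  · subst hj
    unfold pvBstep
    rw [PySem.List.pyGetD_zero_cons]
    simp
  · have hj1 : 1 ≤ j := by omega
    unfold pvBstep
    rw [pvGetD_step _ k j hj1 h2, show max 0 (j - 1) = j - 1 by omega]
    have hco : pvS (1 :: List.replicate (k-1).toNat 0) (j - 1) j
        = PySem.List.pyGetD (1 :: List.replicate (k-1).toNat 0) (j - 1) 0 := by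
      have hs := pvS_succ (1 :: List.replicate (k-1).toNat 0) (j - 1) (j - 1) le_rfl
      rw [pvS_empty, show j - 1 + 1 = j by ring] at hs
      simpa using hs
    rw [hco, pvGetD_ex0 k (j - 1) (by omega) (by omega)]
    by_cases hj2 : j = 1
    · simp [hj2, pvM]
    · rw [if_neg (by omega), if_neg hj2]
      simp [pvmod_def]

-- main equivalence
theorem pvMain (word : String) (k : Int) (hD : ¬ D_countOriginalStrings word k) :
    countOriginalStrings word k = countOriginalStrings_alt word k := by
  rw [pvA_eq, pvB_eq]
  cases hcs : word.toList with
  | nil =>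
      have hword : word = "" := String.toList_eq_nil_iff.mp hcs
      have hk1 : k ≠ 1 := fun hk => hD ⟨hword, hk⟩
      rw [pvGA_nil word hcs]
      have hT1 : pvTot [1] = 1 := by decide
      have hT0 : pvTot ([] : List Int) = 1 := by decide
      simp only [pvRuns, hT1, hT0]
      by_cases hk0 : k ≤ 0
      · rw [if_pos (by simp; omega), if_pos (by simp; omega)]
      · have hk2 : 2 ≤ k := by omega
        rw [if_neg (by simp; omega), if_neg (by simp; omega)]
        simp only [List.foldl_nil]
        rw [pvFoldl_sum_eq_pvS,
            show (((1 :: List.replicate (k-1).toNat (0:Int)).length : Nat) : Int) = k by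
              simp; omega,
            pvSum_ex0 k (by omega)]
        simp only [List.foldl_cons, List.foldl_nil]
        have hInv1 := pvInv_step k 1 (List.replicate k.toNat 1)
          (1 :: List.replicate (k-1).toNat 0) (pvInv_init k (by omega)) le_rfl (by omega)
        obtain ⟨_, _, hI1⟩ := hInv1
        have h1 := hI1 (k - 1) (by omega) (by omega)
        rw [show k - 1 + 1 = k by ring, pvSum_ex1 k hk2] at h1
        unfold pvAstep at h1 ⊢
        rw [h1]
        simp only [pvmod_def]
        simp only [pvM]
        omega
  | cons c rest =>
      rw [pvGA_cons word c rest hcs, hcs]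
      by_cases hge : ((pvRuns (c :: rest)).length : Int) ≥ k
      · rw [if_pos hge, if_pos hge]
      · rw [if_neg hge, if_neg hge]
        have hlen : 1 ≤ (pvRuns (c :: rest)).length := by
          cases hne : pvRuns (c :: rest) with
          | nil => exact absurd hne (by simp only [pvRuns]; exact pvRunsGo_ne_nil rest c 1)
          | cons a l => simp
        exact pvDP_eq k _ (pvRuns (c :: rest)) (pvRuns_pos _) (by omega)

-- ===== VERDICT (by name: the statement is the Claim_ definition above) =====
theorem countOriginalStrings_spec : Claim_unchanged_countOriginalStrings := by
  intro word k _ hD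
  exact pvMain word k hD

theorem countOriginalStrings_changed : Claim_changed_countOriginalStrings := by
  unfold Claim_changed_countOriginalStrings; decide

theorem countOriginalStrings_tight : Claim_exact_countOriginalStrings := by
  intro word k _ hD
  obtain ⟨hw, hk⟩ := hD
  subst hw; subst hk; decide
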